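-- pv_equiv track=rewrite | github.com/stalj/pp1 | 04-Subroutines/zadanie40.py | f
-- ===== SOURCE A (Python) =====
-- def f(number):
--     number = str(number)
--     sum = 0
--     digit_count = {}
--     for i in number:
--         if i in digit_count:
--             digit_count[i] += 1
--         else:
--             digit_count[i] = 1
--     for i, count in digit_count.items():
--         if count > 1:
--             sum += int(i)*count
--     return sum
-- ===== SOURCE B (Python) =====
-- def f(number):
--     total = 0
--     cur = None
--     run = 0
--     for c in sorted(str(number)):
--         if c == cur:
--             run += 1
--         else:
--             if run > 1:
--                 total += int(cur) * run
--             cur = c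
--             run = 1
--     if run > 1:
--         total += int(cur) * run
--     return total
-- ===== Notes on version B (the rewrite author's own statement) =====
-- stated objective: alternative
-- what changed: Replaced the frequency-dict build plus a second loop over its items by a sort-then-scan: sort the digits of str(number) and sweep once over runs of equal characters with a (current char, run length) accumulator, adding int(cur)*run for each run longer than 1.
import Mathlib
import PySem

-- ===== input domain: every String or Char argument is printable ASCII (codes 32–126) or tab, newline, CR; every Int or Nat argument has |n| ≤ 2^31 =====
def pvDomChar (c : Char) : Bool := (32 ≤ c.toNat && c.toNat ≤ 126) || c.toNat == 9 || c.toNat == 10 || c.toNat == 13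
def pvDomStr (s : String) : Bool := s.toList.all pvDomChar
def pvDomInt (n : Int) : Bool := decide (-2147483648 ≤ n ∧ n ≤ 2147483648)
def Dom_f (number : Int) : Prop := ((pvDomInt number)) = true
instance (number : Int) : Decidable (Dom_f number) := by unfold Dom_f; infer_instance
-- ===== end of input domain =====

-- B replaces A's frequency-dict build plus second loop over its items by a sort-then-scan:
-- sort the characters of str(number) and sweep once over runs of equal characters with a
-- (current char, run length) accumulator, flushing int(cur)*run for runs longer than 1;
-- objective: alternative (same result by grouping a sorted sequence).

-- ===== PORT A =====
-- int(i) for a single character i; both programs apply it only to characters occurring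
-- more than once in str(number), which are always digits, so int() never raises and the
-- default 0 is never taken.
def pvIntOf (c : Char) : Int := (PySem.Int.ofChars? [c]).getD 0

def f (number : Int) : Int :=
  let s := (PySem.Int.toStr number).toList
  let digit_count : PySem.Dict Char Int :=
    s.foldl (fun d i =>
      if d.contains i then d.insert i (d.getD i 0 + 1) else d.insert i 1)
      PySem.Dict.empty
  digit_count.items.foldl (fun sum ic =>
    if 1 < ic.2 then sum + pvIntOf ic.1 * ic.2 else sum) 0

-- ===== PORT B =====
-- int(cur): in Python cur is None only while run = 0, and int(cur) runs only when run > 1,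
-- so the none-arm's 0 is never taken.
def pvVal (cur : Option Char) : Int :=
  match cur with
  | some k => pvIntOf k
  | none => 0

-- the loop body: if c == cur: run += 1  else: flush the finished run, start a new one
def pvStep (st : Int × Option Char × Int) (c : Char) : Int × Option Char × Int :=
  match st with
  | (total, cur, run) =>
    if some c = cur then (total, cur, run + 1)
    else ((if 1 < run then total + pvVal cur * run else total), some c, 1)

-- the trailing 'if run > 1: total += int(cur) * run'
def pvFlush (st : Int × Option Char × Int) : Int :=
  if 1 < st.2.2 then st.1 + pvVal st.2.1 * st.2.2 else st.1

def f_alt (number : Int) : Int :=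
  let t := PySem.List.sorted (PySem.Int.toStr number).toList (fun x => x) false
  pvFlush (t.foldl pvStep (0, none, 0))

-- ===== PRECONDITION & SPEC =====
def Spec_f (number : Int) (out : Int) : Prop := out = f_alt number
instance (number : Int) (out : Int) : Decidable (Spec_f number out) := by unfold Spec_f; infer_instance

-- ===== CLAIM (what is proved, stated in full; the proofs are below) =====
def Claim_equal_f : Prop := ∀ (number : Int), Dom_f number → Spec_f number (f number)

-- ===== LEMMAS AND PROOFS =====

-- the contribution of one distinct character with its multiplicity
def pvW (k : Char) (n : Int) : Int := if 1 < n then pvIntOf k * n else 0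

-- the common spec: sum over the distinct characters of u of their weighted contribution
def pvS (u : List Char) : Int := ∑ k ∈ u.toFinset, pvW k (u.count k : Int)

theorem pvS_nil : pvS [] = 0 := by simp [pvS]

-- peeling one maximal run off the front of the multiset
theorem pvS_run (a : Char) (n : Nat) (u : List Char) (hn : 0 < n) (ha : a ∉ u) :
    pvS (List.replicate n a ++ u) = pvW a (n : Int) + pvS u := by
  unfold pvS
  rw [List.toFinset_append, List.toFinset_replicate_of_ne_zero (Nat.pos_iff_ne_zero.mp hn)]
  have haf : a ∉ u.toFinset := by simpa using ha
  rw [Finset.singleton_union, Finset.sum_insert haf]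
  congr 1
  · congr 1
    simp [List.count_append, List.count_eq_zero_of_not_mem ha]
  · apply Finset.sum_congr rfl
    intro k hk
    have hku : k ∈ u := List.mem_toFinset.mp hk
    have hka : a ≠ k := fun h => ha (h ▸ hku)
    simp [List.count_append, List.count_replicate, hka]

-- the scan invariant: a run of a of length n is open, everything still to come is ≥ a
theorem pvScan (t : List Char) (hp : t.Pairwise (· ≤ ·)) :
    ∀ (a : Char) (n : Nat) (tot : Int), 0 < n → (∀ x ∈ t, a ≤ x) →
      pvFlush (t.foldl pvStep (tot, some a, (n : Int))) = tot + pvS (List.replicate n a ++ t) := by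
  induction t with
  | nil =>
    intro a n tot hn _
    rw [show List.replicate n a ++ ([] : List Char) = List.replicate n a from List.append_nil _] at *
    rw [show List.replicate n a = List.replicate n a ++ ([] : List Char) from (List.append_nil _).symm,
        pvS_run a n [] hn (by simp), pvS_nil]
    by_cases h1 : (1 : Int) < (n : Int) <;> simp [pvFlush, pvVal, pvW, h1]
  | cons b t' ih =>
    intro a n tot hn hle
    have hp' : t'.Pairwise (· ≤ ·) := hp.of_cons
    by_cases hab : a = b
    · subst hab
      have hstep : pvStep (tot, some a, (n : Int)) a = (tot, some a, ((n + 1 : Nat) : Int)) := by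
        simp [pvStep]
      rw [List.foldl_cons, hstep,
          ih hp' a (n + 1) tot (Nat.succ_pos n) (fun x hx => hle x (List.mem_cons_of_mem _ hx))]
      congr 1
      rw [show List.replicate n a ++ a :: t' = List.replicate (n + 1) a ++ t' by
            rw [List.replicate_succ']; simp]
    · have hstep : pvStep (tot, some a, (n : Int)) b
          = (tot + pvW a (n : Int), some b, ((1 : Nat) : Int)) := by
        have : ¬ (some b = some a) := by simpa using fun h => hab h.symm
        by_cases h1 : (1 : Int) < (n : Int) <;> simp [pvStep, this, pvVal, pvW, h1]
      have hbb : ∀ x ∈ t', b ≤ x := fun x hx => (List.pairwise_cons.mp hp).1 x hx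
      have halt : a < b := lt_of_le_of_ne (hle b (List.mem_cons_self)) hab
      have hanotin : a ∉ b :: t' := by
        intro h
        rcases List.mem_cons.mp h with h | h
        · exact hab h
        · exact absurd (lt_of_lt_of_le halt (hbb a h)) (lt_irrefl a)
      rw [List.foldl_cons, hstep,
          ih hp' b 1 (tot + pvW a (n : Int)) Nat.one_pos hbb,
          pvS_run a n (b :: t') hn hanotin]
      have : List.replicate 1 b ++ t' = b :: t' := by simp
      rw [this]; ring

-- pvS is invariant under permutation (counts and the distinct set are)
theorem pvS_perm (u v : List Char) (h : u.Perm v) : pvS u = pvS v := by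
  unfold pvS
  rw [List.toFinset_eq_of_perm u v h]
  exact Finset.sum_congr rfl (fun k _ => by rw [h.count_eq])

-- the whole scan on a sorted list computes pvS of it
theorem pvScanTop (t : List Char) (hpair : t.Pairwise (· ≤ ·)) :
    pvFlush (t.foldl pvStep (0, none, 0)) = pvS t := by
  cases t with
  | nil => simp [pvS_nil, pvFlush]
  | cons a t' =>
    have hp' : t'.Pairwise (· ≤ ·) := hpair.of_cons
    have hle : ∀ x ∈ t', a ≤ x := (List.pairwise_cons.mp hpair).1
    have hstep : pvStep (0, none, 0) a = (0, some a, ((1 : Nat) : Int)) := by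
      simp [pvStep]
    rw [List.foldl_cons, hstep, pvScan t' hp' a 1 0 Nat.one_pos hle]
    simp

-- B computes pvS of the character list
theorem f_alt_eq_pvS (number : Int) :
    f_alt number = pvS (PySem.Int.toStr number).toList := by
  unfold f_alt
  dsimp only
  rw [pvScanTop _ (by
        simpa using PySem.List.sorted_pairwise (PySem.Int.toStr number).toList (fun x => x))]
  exact pvS_perm _ _
    (PySem.List.sorted_perm (PySem.Int.toStr number).toList (fun x => x) false)

-- A computes pvS of the character list
theorem f_eq_pvS (number : Int) :
    f number = pvS (PySem.Int.toStr number).toList := by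
  unfold f
  dsimp only
  set s := (PySem.Int.toStr number).toList with hs
  have hloop : s.foldl (fun d i =>
      if d.contains i then d.insert i (d.getD i 0 + 1) else d.insert i 1)
      PySem.Dict.empty = PySem.Dict.counter s := by
    rw [← PySem.Dict.foldl_insert_getD_add_one_eq_counter]
    apply PySem.List.foldl_congr_mem
    intro d i _
    by_cases h : d.contains i = true
    · simp [h]
    · simp [h, PySem.Dict.getD_of_not_contains d 0 (by simpa using h)]
  rw [hloop,
      PySem.List.foldl_congr_mem (PySem.Dict.counter s).items
        (fun sum ic => if 1 < ic.2 then sum + pvIntOf ic.1 * ic.2 else sum)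
        (fun sum ic => sum + pvW ic.1 ic.2) 0
        (by intro acc ic _; by_cases h : 1 < ic.2 <;> simp [pvW, h]),
      PySem.List.foldl_add _ (fun ic : Char × Int => pvW ic.1 ic.2) 0,
      PySem.Dict.items_counter s, List.map_map, zero_add]
  have hto : (PySem.Set.ofList s).toFinset = s.toFinset := by
    apply Finset.ext
    intro k
    simp [List.mem_toFinset, PySem.Set.mem_ofList]
  unfold pvS
  rw [← hto, List.sum_toFinset _ (PySem.Set.nodup_ofList s)]
  rfl

-- ===== VERDICT (by name: the statement is the Claim_ definition above) =====
theorem f_spec : Claim_equal_f := by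
  intro number _
  unfold Spec_f
  rw [f_eq_pvS, f_alt_eq_pvS]
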